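-- pv_equiv track=rewrite | github.com/shekharbhide/Python-For-Data-Engineering | 1.py | highest_salary
-- ===== SOURCE A (Python) =====
-- def highest_salary(data):
--     results={}
--
--     for x in data:
--         sal = x['salary']
--         if sal not in results:
--             results[sal] = []
--
--         results[sal].append(x['name'])
--     return results
-- ===== SOURCE B (Python) =====
-- def highest_salary(data):
--     # group-by via ordered key dedup + one comprehension per salary (alternative decomposition)
--     order = list(dict.fromkeys(x['salary'] for x in data))
--     return {s: [x['name'] for x in data if x['salary'] == s] for s in order}
-- ===== Notes on version B (the rewrite author's own statement) =====
-- stated objective: alternative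
-- what changed: A builds the dict in one mutating pass appending names; B first computes the distinct salaries in first-appearance order (dict.fromkeys) and then builds each group with a separate filtering comprehension per salary.
import Mathlib
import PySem

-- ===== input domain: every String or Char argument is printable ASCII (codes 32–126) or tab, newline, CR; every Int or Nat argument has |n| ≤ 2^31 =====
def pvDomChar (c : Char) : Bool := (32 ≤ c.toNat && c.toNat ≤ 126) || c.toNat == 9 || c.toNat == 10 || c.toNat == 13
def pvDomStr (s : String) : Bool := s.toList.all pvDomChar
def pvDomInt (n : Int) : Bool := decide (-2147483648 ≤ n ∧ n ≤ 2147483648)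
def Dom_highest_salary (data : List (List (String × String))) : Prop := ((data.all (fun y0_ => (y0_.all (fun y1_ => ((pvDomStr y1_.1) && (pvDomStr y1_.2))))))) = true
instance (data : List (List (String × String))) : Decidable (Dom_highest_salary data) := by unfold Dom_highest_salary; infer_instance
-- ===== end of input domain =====

-- B replaces A's single mutating grouping pass by an ordered key-dedup followed by one filter pass
-- per distinct salary (alternative decomposition, same results).


-- ===== PORT A =====
-- results={}; for x in data: sal=x['salary']; if sal not in results: results[sal]=[];
-- results[sal].append(x['name']); return results
def highest_salary (data : List (List (String × String))) : List (String × List String) :=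
  (data.foldl
    (fun results x =>
      let sal := (PySem.Dict.mk x).getD "salary" ""
      let results := if results.contains sal = false then results.insert sal ([] : List String) else results
      results.modify sal [] (fun l => l ++ [(PySem.Dict.mk x).getD "name" ""]))
    PySem.Dict.empty).items

-- ===== PORT B =====
-- order = list(dict.fromkeys(x['salary'] for x in data));
-- {s: [x['name'] for x in data if x['salary'] == s] for s in order}
-- (dict comprehension over the already-distinct keys of `order` yields items in `order`'s order)
def highest_salary_alt (data : List (List (String × String))) : List (String × List String) :=
  let order := PySem.List.dedup (data.map (fun x => (PySem.Dict.mk x).getD "salary" ""))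
  order.map (fun s =>
    (s, (data.filter (fun x => (PySem.Dict.mk x).getD "salary" "" == s)).map
          (fun x => (PySem.Dict.mk x).getD "name" "")))

-- ===== PRECONDITION & SPEC =====
-- Pre_ excludes exactly the records missing a 'salary' or 'name' key, where the Python A
-- raises KeyError (and B raises too).
def Pre_highest_salary (data : List (List (String × String))) : Prop :=
  (data.all (fun x => (PySem.Dict.mk x).contains "salary" && (PySem.Dict.mk x).contains "name")) = true
instance (data : List (List (String × String))) : Decidable (Pre_highest_salary data) := by unfold Pre_highest_salary; infer_instance
def pvWitness_highest_salary : (List (List (String × String))) :=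
  [[("salary", "100"), ("name", "ann")], [("salary", "200"), ("name", "bob")], [("salary", "100"), ("name", "cy")]]
def Spec_highest_salary (data : List (List (String × String))) (out : List (String × List String)) : Prop := out = highest_salary_alt data
instance (data : List (List (String × String))) (out : List (String × List String)) : Decidable (Spec_highest_salary data out) := by unfold Spec_highest_salary; infer_instance

-- ===== CLAIM (what is proved, stated in full; the proofs are below) =====
def Claim_equal_highest_salary : Prop := ∀ (data : List (List (String × String))), Dom_highest_salary data → Pre_highest_salary data → Spec_highest_salary data (highest_salary data)

-- ===== LEMMAS AND PROOFS =====

-- A's "setdefault-then-append" step equals a plain modify-with-default step.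
theorem hs_step_eq (d : PySem.Dict String (List String)) (k : String) (f : List String → List String)
    (h : d.contains k = false) :
    (d.insert k []).modify k [] f = d.modify k [] f := by
  have hkeys : ∀ p ∈ d.items, p.1 ≠ k := by
    intro p hp hpk
    have := PySem.Dict.mem_keys_of_mem_items (d := d) hp
    rw [hpk] at this; have h2 := (PySem.Dict.contains_iff_mem_keys d k).mpr this; rw [h] at h2
    simp at h2
  have hins : PySem.Dict.mk (d.items ++ [(k, [])]) = d.insert k [] := by
    simp [PySem.Dict.insert, h]
  have hgd : d.getD k [] = [] := PySem.Dict.getD_of_not_contains d [] h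
  simp only [PySem.Dict.modify, PySem.Dict.insert, h, Bool.false_eq_true, ↓reduceIte,
    PySem.Dict.contains_mk, List.any_append, List.any_cons, BEq.rfl, List.any_nil, Bool.or_false,
    Bool.or_true, beq_iff_eq, List.map_append, List.map_cons, List.map_nil, PySem.Dict.mk.injEq,
    List.append_singleton_inj, Prod.mk.injEq, true_and]
  rw [hins, PySem.Dict.getD_insert_self, hgd]
  refine ⟨?_, rfl⟩
  exact (List.map_congr_left (fun p hp => if_neg (hkeys p hp))).trans (List.map_id _)

-- A's whole loop is the pair-keyed modify fold.
theorem hs_foldl_eq (data : List (List (String × String))) :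
    (data.foldl
      (fun results x =>
        let sal := (PySem.Dict.mk x).getD "salary" ""
        let results := if results.contains sal = false then results.insert sal ([] : List String) else results
        results.modify sal [] (fun l => l ++ [(PySem.Dict.mk x).getD "name" ""]))
      PySem.Dict.empty)
    = (data.map (fun x => ((PySem.Dict.mk x).getD "salary" "", (PySem.Dict.mk x).getD "name" ""))).foldl
        (fun d p => d.modify p.1 [] (fun l => l ++ [p.2])) PySem.Dict.empty := by
  rw [List.foldl_map]
  apply congrFun
  apply congrFun
  apply congrArg
  funext d x
  simp only
  by_cases h : d.contains ((PySem.Dict.mk x).getD "salary" "") = false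
  · rw [if_pos h, hs_step_eq _ _ _ h]
  · rw [if_neg h]

-- ===== VERDICT =====
theorem highest_salary_spec : Claim_equal_highest_salary := by
  intro data _ _
  unfold Spec_highest_salary highest_salary highest_salary_alt
  rw [hs_foldl_eq]
  set l := data.map (fun x => ((PySem.Dict.mk x).getD "salary" "", (PySem.Dict.mk x).getD "name" "")) with hl
  have hnodup : ((l.foldl (fun d p => d.modify p.1 [] (fun t => t ++ [p.2])) PySem.Dict.empty)).keys.Nodup := by
    apply PySem.Dict.nodup_keys_foldl_modify_key l Prod.fst [] (fun d p t => t ++ [p.2])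
    simp
  rw [PySem.Dict.items_eq_map_keys _ hnodup []]
  rw [PySem.Dict.keys_foldl_modify_key l Prod.fst [] (fun d p t => t ++ [p.2])]
  have hkeys : PySem.Set.update (PySem.Dict.empty : PySem.Dict String (List String)).keys (l.map Prod.fst)
      = PySem.List.dedup (data.map (fun x => (PySem.Dict.mk x).getD "salary" "")) := by
    rw [PySem.List.dedup_eq_ofList]
    simp [PySem.Set.update, PySem.Set.ofList_eq_foldl, hl, List.map_map]
    rfl
  rw [hkeys]
  simp only
  apply List.map_congr_left
  intro s _
  rw [PySem.Dict.getD_foldl_modify_append l PySem.Dict.empty s]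
  simp [hl, List.filter_map, List.map_map, Function.comp_def]
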